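-- pv_equiv track=rewrite | github.com/OneKekBer/matura-z-informatyki | practise/liczby-2022/3.1.py | find_piatki
-- ===== SOURCE A (Python) =====
-- def czy_dobra_piatka(x,y,z,u,w):
--    if(y % x == 0 and z % y == 0 and u % z == 0 and w % u == 0):
--       return True
--    return False
--
-- def find_piatki(array):
--    odp = []
--    n = len(array)
--    for i in range(n):
--       for j in range(i+1, n):
--          if(array[j] % array[i] != 0):
--             continue
--
--          for k in range(j + 1, n):
--             if(array[k] % array[j] != 0):
--                continue
--
--             for l in range(k+1,n):
--                if(array[l] % array[k] != 0):
--                   continue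
--
--                for m in range(l+1,n):
--                   if(array[m] % array[l] != 0):
--                      continue
--
--                   if czy_dobra_piatka(array[i], array[j], array[k], array[l], array[m]) is True:
--                      odp.append([array[i], array[j], array[k],array[l], array[m]])
--    return odp
-- ===== SOURCE B (Python) =====
-- def find_piatki(array):
--     n = len(array)
--     # breadth-first staged extension: grow all divisor chains one index at a time
--     chains = [[i] for i in range(n)]
--     for _ in range(4):
--         chains = [c + [j]
--                   for c in chains
--                   for j in range(c[-1] + 1, n)
--                   if array[j] % array[c[-1]] == 0]
--     return [[array[i] for i in c] for c in chains]
-- ===== Notes on version B (the rewrite author's own statement) =====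
-- stated objective: alternative
-- what changed: B replaces A's five nested index loops with per-pair guards by a staged breadth-first worklist: it keeps a list of partial index chains and runs four extension passes, each appending every valid divisible successor index to every chain, then maps indices to values at the end.
import Mathlib
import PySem

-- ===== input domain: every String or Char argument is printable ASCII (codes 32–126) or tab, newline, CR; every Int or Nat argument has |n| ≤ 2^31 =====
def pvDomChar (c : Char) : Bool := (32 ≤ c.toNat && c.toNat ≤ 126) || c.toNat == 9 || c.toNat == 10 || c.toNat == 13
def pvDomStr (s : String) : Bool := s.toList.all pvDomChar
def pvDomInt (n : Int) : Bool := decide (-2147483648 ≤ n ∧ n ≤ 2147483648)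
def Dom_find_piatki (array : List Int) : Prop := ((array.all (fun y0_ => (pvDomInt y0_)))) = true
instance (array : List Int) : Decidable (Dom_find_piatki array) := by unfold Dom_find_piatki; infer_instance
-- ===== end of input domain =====

-- B replaces A's five nested index loops by a staged breadth-first worklist: it grows a list of
-- partial index chains one level at a time (4 extension passes) and maps indices to values at the
-- end (objective: alternative decomposition).

-- ===== PORT A =====
def czy_dobra_piatka (x y z u w : Int) : Bool :=
  if PySem.Int.mod y x = 0 ∧ PySem.Int.mod z y = 0 ∧ PySem.Int.mod u z = 0 ∧ PySem.Int.mod w u = 0 then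
    true
  else
    false

def find_piatki (array : List Int) : List (List Int) :=
  let n := PySem.List.len array
  (PySem.List.pyRange 0 n 1).foldl (fun odp i =>
    (PySem.List.pyRange (i + 1) n 1).foldl (fun odp j =>
      if PySem.Int.mod (PySem.List.pyGetD array j 0) (PySem.List.pyGetD array i 0) ≠ 0 then odp
      else
        (PySem.List.pyRange (j + 1) n 1).foldl (fun odp k =>
          if PySem.Int.mod (PySem.List.pyGetD array k 0) (PySem.List.pyGetD array j 0) ≠ 0 then odp
          else
            (PySem.List.pyRange (k + 1) n 1).foldl (fun odp l =>
              if PySem.Int.mod (PySem.List.pyGetD array l 0) (PySem.List.pyGetD array k 0) ≠ 0 then odp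
              else
                (PySem.List.pyRange (l + 1) n 1).foldl (fun odp m =>
                  if PySem.Int.mod (PySem.List.pyGetD array m 0) (PySem.List.pyGetD array l 0) ≠ 0 then odp
                  else
                    if czy_dobra_piatka (PySem.List.pyGetD array i 0) (PySem.List.pyGetD array j 0)
                        (PySem.List.pyGetD array k 0) (PySem.List.pyGetD array l 0)
                        (PySem.List.pyGetD array m 0) = true then
                      odp ++ [[PySem.List.pyGetD array i 0, PySem.List.pyGetD array j 0,
                               PySem.List.pyGetD array k 0, PySem.List.pyGetD array l 0,
                               PySem.List.pyGetD array m 0]]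
                    else odp) odp) odp) odp) odp) []

-- ===== PORT B =====
def find_piatki_alt (array : List Int) : List (List Int) :=
  let n := PySem.List.len array
  let chains0 : List (List Int) := (PySem.List.pyRange 0 n 1).map (fun i => [i])
  let chains := (PySem.List.pyRange 0 4 1).foldl (fun chains _ =>
    chains.flatMap (fun c =>
      ((PySem.List.pyRange (PySem.List.pyGetD c (-1) 0 + 1) n 1).filter (fun j =>
        PySem.Int.mod (PySem.List.pyGetD array j 0)
          (PySem.List.pyGetD array (PySem.List.pyGetD c (-1) 0) 0) == 0)).map
        (fun j => c ++ [j]))) chains0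
  chains.map (fun c => c.map (fun i => PySem.List.pyGetD array i 0))

-- ===== PRECONDITION & SPEC =====
-- Pre_ excludes exactly the inputs where the Python A raises ZeroDivisionError: some element
-- other than the last is 0 (it then appears as a divisor in the j-loop guard).
def Pre_find_piatki (array : List Int) : Prop := ∀ x ∈ array.dropLast, x ≠ 0
instance (array : List Int) : Decidable (Pre_find_piatki array) := by unfold Pre_find_piatki; infer_instance
def pvWitness_find_piatki : List Int := [1, 2, 4, 8, 24]

def Spec_find_piatki (array : List Int) (out : List (List Int)) : Prop := out = find_piatki_alt array
instance (array : List Int) (out : List (List Int)) : Decidable (Spec_find_piatki array out) := by unfold Spec_find_piatki; infer_instance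

-- ===== CLAIM (what is proved, stated in full; the proofs are below) =====
def Claim_equal_find_piatki : Prop := ∀ (array : List Int), Dom_find_piatki array → Pre_find_piatki array → Spec_find_piatki array (find_piatki array)

-- ===== LEMMAS AND PROOFS =====

-- the successor list of index x: later indices whose element is divisible by array[x]
def pvSucc (array : List Int) (n x : Int) : List Int :=
  (PySem.List.pyRange (x + 1) n 1).filter (fun y =>
    PySem.Int.mod (PySem.List.pyGetD array y 0) (PySem.List.pyGetD array x 0) == 0)

-- the canonical chain enumeration both ports are reduced to
def pvChains (array : List Int) : List (List Int) :=
  let n := PySem.List.len array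
  (PySem.List.pyRange 0 n 1).flatMap (fun i =>
    (pvSucc array n i).flatMap (fun j =>
      (pvSucc array n j).flatMap (fun k =>
        (pvSucc array n k).flatMap (fun l =>
          (pvSucc array n l).map (fun m =>
            [PySem.List.pyGetD array i 0, PySem.List.pyGetD array j 0,
             PySem.List.pyGetD array k 0, PySem.List.pyGetD array l 0,
             PySem.List.pyGetD array m 0])))))

lemma pv_innerM (array : List Int) (gi gj gk gl : Int)
    (h1 : PySem.Int.mod gj gi = 0) (h2 : PySem.Int.mod gk gj = 0) (h3 : PySem.Int.mod gl gk = 0) :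
    ∀ (lst : List Int) (acc : List (List Int)),
    lst.foldl (fun odp m =>
        if PySem.Int.mod (PySem.List.pyGetD array m 0) gl ≠ 0 then odp
        else
          if czy_dobra_piatka gi gj gk gl (PySem.List.pyGetD array m 0) = true then
            odp ++ [[gi, gj, gk, gl, PySem.List.pyGetD array m 0]]
          else odp) acc
    = acc ++ (lst.filter (fun m => PySem.Int.mod (PySem.List.pyGetD array m 0) gl == 0)).map
        (fun m => [gi, gj, gk, gl, PySem.List.pyGetD array m 0]) := by
  intro lst
  induction lst with
  | nil => intro acc; simp
  | cons a t ih =>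
    intro acc
    by_cases hm : PySem.Int.mod (PySem.List.pyGetD array a 0) gl = 0
    · rw [List.foldl_cons, if_neg (not_not_intro hm),
        if_pos (show czy_dobra_piatka gi gj gk gl (PySem.List.pyGetD array a 0) = true by
          simp [czy_dobra_piatka, h1, h2, h3, hm]), ih]
      simp [hm]
    · rw [List.foldl_cons, if_pos hm, ih]
      simp [hm]

lemma pv_L4 (array : List Int) (n gi gj gk : Int)
    (h1 : PySem.Int.mod gj gi = 0) (h2 : PySem.Int.mod gk gj = 0) :
    ∀ (lst : List Int) (acc : List (List Int)),
    lst.foldl (fun odp l =>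
        if PySem.Int.mod (PySem.List.pyGetD array l 0) gk ≠ 0 then odp
        else
          (PySem.List.pyRange (l + 1) n 1).foldl (fun odp m =>
            if PySem.Int.mod (PySem.List.pyGetD array m 0) (PySem.List.pyGetD array l 0) ≠ 0 then odp
            else
              if czy_dobra_piatka gi gj gk (PySem.List.pyGetD array l 0)
                  (PySem.List.pyGetD array m 0) = true then
                odp ++ [[gi, gj, gk, PySem.List.pyGetD array l 0, PySem.List.pyGetD array m 0]]
              else odp) odp) acc
    = acc ++ (lst.filter (fun l => PySem.Int.mod (PySem.List.pyGetD array l 0) gk == 0)).flatMap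
        (fun l => (pvSucc array n l).map
          (fun m => [gi, gj, gk, PySem.List.pyGetD array l 0, PySem.List.pyGetD array m 0])) := by
  intro lst
  induction lst with
  | nil => intro acc; simp
  | cons a t ih =>
    intro acc
    by_cases hm : PySem.Int.mod (PySem.List.pyGetD array a 0) gk = 0
    · rw [List.foldl_cons, if_neg (not_not_intro hm), pv_innerM array gi gj gk (PySem.List.pyGetD array a 0) h1 h2 hm, ih]
      simp [pvSucc, hm, List.append_assoc]
    · rw [List.foldl_cons, if_pos hm, ih]
      simp [hm]

lemma pv_L3 (array : List Int) (n gi gj : Int) (h1 : PySem.Int.mod gj gi = 0) :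
    ∀ (lst : List Int) (acc : List (List Int)),
    lst.foldl (fun odp k =>
        if PySem.Int.mod (PySem.List.pyGetD array k 0) gj ≠ 0 then odp
        else
          (PySem.List.pyRange (k + 1) n 1).foldl (fun odp l =>
            if PySem.Int.mod (PySem.List.pyGetD array l 0) (PySem.List.pyGetD array k 0) ≠ 0 then odp
            else
              (PySem.List.pyRange (l + 1) n 1).foldl (fun odp m =>
                if PySem.Int.mod (PySem.List.pyGetD array m 0) (PySem.List.pyGetD array l 0) ≠ 0 then odp
                else
                  if czy_dobra_piatka gi gj (PySem.List.pyGetD array k 0)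
                      (PySem.List.pyGetD array l 0) (PySem.List.pyGetD array m 0) = true then
                    odp ++ [[gi, gj, PySem.List.pyGetD array k 0, PySem.List.pyGetD array l 0,
                             PySem.List.pyGetD array m 0]]
                  else odp) odp) odp) acc
    = acc ++ (lst.filter (fun k => PySem.Int.mod (PySem.List.pyGetD array k 0) gj == 0)).flatMap
        (fun k => (pvSucc array n k).flatMap
          (fun l => (pvSucc array n l).map
            (fun m => [gi, gj, PySem.List.pyGetD array k 0, PySem.List.pyGetD array l 0,
                       PySem.List.pyGetD array m 0]))) := by
  intro lst
  induction lst with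
  | nil => intro acc; simp
  | cons a t ih =>
    intro acc
    by_cases hm : PySem.Int.mod (PySem.List.pyGetD array a 0) gj = 0
    · rw [List.foldl_cons, if_neg (not_not_intro hm), pv_L4 array n gi gj (PySem.List.pyGetD array a 0) h1 hm, ih]
      simp [pvSucc, hm, List.append_assoc]
    · rw [List.foldl_cons, if_pos hm, ih]
      simp [hm]

lemma pv_L2 (array : List Int) (n gi : Int) :
    ∀ (lst : List Int) (acc : List (List Int)),
    lst.foldl (fun odp j =>
        if PySem.Int.mod (PySem.List.pyGetD array j 0) gi ≠ 0 then odp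
        else
          (PySem.List.pyRange (j + 1) n 1).foldl (fun odp k =>
            if PySem.Int.mod (PySem.List.pyGetD array k 0) (PySem.List.pyGetD array j 0) ≠ 0 then odp
            else
              (PySem.List.pyRange (k + 1) n 1).foldl (fun odp l =>
                if PySem.Int.mod (PySem.List.pyGetD array l 0) (PySem.List.pyGetD array k 0) ≠ 0 then odp
                else
                  (PySem.List.pyRange (l + 1) n 1).foldl (fun odp m =>
                    if PySem.Int.mod (PySem.List.pyGetD array m 0) (PySem.List.pyGetD array l 0) ≠ 0 then odp
                    else
                      if czy_dobra_piatka gi (PySem.List.pyGetD array j 0)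
                          (PySem.List.pyGetD array k 0) (PySem.List.pyGetD array l 0)
                          (PySem.List.pyGetD array m 0) = true then
                        odp ++ [[gi, PySem.List.pyGetD array j 0, PySem.List.pyGetD array k 0,
                                 PySem.List.pyGetD array l 0, PySem.List.pyGetD array m 0]]
                      else odp) odp) odp) odp) acc
    = acc ++ (lst.filter (fun j => PySem.Int.mod (PySem.List.pyGetD array j 0) gi == 0)).flatMap
        (fun j => (pvSucc array n j).flatMap
          (fun k => (pvSucc array n k).flatMap
            (fun l => (pvSucc array n l).map
              (fun m => [gi, PySem.List.pyGetD array j 0, PySem.List.pyGetD array k 0,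
                         PySem.List.pyGetD array l 0, PySem.List.pyGetD array m 0])))) := by
  intro lst
  induction lst with
  | nil => intro acc; simp
  | cons a t ih =>
    intro acc
    by_cases hm : PySem.Int.mod (PySem.List.pyGetD array a 0) gi = 0
    · rw [List.foldl_cons, if_neg (not_not_intro hm), pv_L3 array n gi (PySem.List.pyGetD array a 0) hm, ih]
      simp [pvSucc, hm, List.append_assoc]
    · rw [List.foldl_cons, if_pos hm, ih]
      simp [hm]

lemma pv_A_eq_chains (array : List Int) : find_piatki array = pvChains array := by
  unfold find_piatki pvChains
  have hbody : ∀ (acc : List (List Int)) (i : Int),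
      (PySem.List.pyRange (i + 1) (PySem.List.len array) 1).foldl (fun odp j =>
        if PySem.Int.mod (PySem.List.pyGetD array j 0) (PySem.List.pyGetD array i 0) ≠ 0 then odp
        else
          (PySem.List.pyRange (j + 1) (PySem.List.len array) 1).foldl (fun odp k =>
            if PySem.Int.mod (PySem.List.pyGetD array k 0) (PySem.List.pyGetD array j 0) ≠ 0 then odp
            else
              (PySem.List.pyRange (k + 1) (PySem.List.len array) 1).foldl (fun odp l =>
                if PySem.Int.mod (PySem.List.pyGetD array l 0) (PySem.List.pyGetD array k 0) ≠ 0 then odp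
                else
                  (PySem.List.pyRange (l + 1) (PySem.List.len array) 1).foldl (fun odp m =>
                    if PySem.Int.mod (PySem.List.pyGetD array m 0) (PySem.List.pyGetD array l 0) ≠ 0 then odp
                    else
                      if czy_dobra_piatka (PySem.List.pyGetD array i 0) (PySem.List.pyGetD array j 0)
                          (PySem.List.pyGetD array k 0) (PySem.List.pyGetD array l 0)
                          (PySem.List.pyGetD array m 0) = true then
                        odp ++ [[PySem.List.pyGetD array i 0, PySem.List.pyGetD array j 0,
                                 PySem.List.pyGetD array k 0, PySem.List.pyGetD array l 0,
                                 PySem.List.pyGetD array m 0]]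
                      else odp) odp) odp) odp) acc
      = acc ++ (pvSucc array (PySem.List.len array) i).flatMap
          (fun j => (pvSucc array (PySem.List.len array) j).flatMap
            (fun k => (pvSucc array (PySem.List.len array) k).flatMap
              (fun l => (pvSucc array (PySem.List.len array) l).map
                (fun m => [PySem.List.pyGetD array i 0, PySem.List.pyGetD array j 0,
                           PySem.List.pyGetD array k 0, PySem.List.pyGetD array l 0,
                           PySem.List.pyGetD array m 0])))) := by
    intro acc i
    rw [pv_L2 array (PySem.List.len array) (PySem.List.pyGetD array i 0)]
    rfl
  calc (PySem.List.pyRange 0 (PySem.List.len array) 1).foldl _ [] =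
      (PySem.List.pyRange 0 (PySem.List.len array) 1).foldl
        (fun odp i => odp ++ (pvSucc array (PySem.List.len array) i).flatMap
          (fun j => (pvSucc array (PySem.List.len array) j).flatMap
            (fun k => (pvSucc array (PySem.List.len array) k).flatMap
              (fun l => (pvSucc array (PySem.List.len array) l).map
                (fun m => [PySem.List.pyGetD array i 0, PySem.List.pyGetD array j 0,
                           PySem.List.pyGetD array k 0, PySem.List.pyGetD array l 0,
                           PySem.List.pyGetD array m 0]))))) [] := by
            apply PySem.List.foldl_congr_mem
            intro acc i _
            exact hbody acc i
    _ = _ := by rw [PySem.List.foldl_append_eq_flatMap]; rfl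

lemma pvLast1 (a d : Int) : PySem.List.pyGetD [a] (-1) d = a := rfl
lemma pvLast2 (a b d : Int) : PySem.List.pyGetD [a, b] (-1) d = b := rfl
lemma pvLast3 (a b c d : Int) : PySem.List.pyGetD [a, b, c] (-1) d = c := rfl
lemma pvLast4 (a b c e d : Int) : PySem.List.pyGetD [a, b, c, e] (-1) d = e := rfl

lemma pv_B_eq_chains (array : List Int) : find_piatki_alt array = pvChains array := by
  unfold find_piatki_alt pvChains
  have h4 : PySem.List.pyRange 0 4 1 = [0, 1, 2, 3] := by decide
  simp only [h4, List.foldl_cons, List.foldl_nil, List.flatMap_map, List.map_flatMap,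
    List.flatMap_assoc, List.cons_append, List.nil_append,
    pvLast1, pvLast2, pvLast3, pvLast4, List.map_map, pvSucc]
  simp [Function.comp_def]

-- ===== VERDICT (by name: the statement is the Claim_ definition above) =====
theorem find_piatki_spec : Claim_equal_find_piatki := by
  intro array _ _
  unfold Spec_find_piatki
  rw [pv_A_eq_chains, pv_B_eq_chains]
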